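-- pv_equiv track=rewrite | github.com/chewlabSB2/Cas13gRNAtor | cas13gRNAtor/simpleSearch.py | _align_gRNA
-- ===== SOURCE A (Python) =====
-- def _align_gRNA(string_x, string_y, bt, sensitive_region = range(15,22)):
-- 	'''
-- 	string_x - reference gRNA
-- 	string_y - gRNA
-- 	return cigar/ get position of Indels
-- 	'''
-- 	op = []
-- 	mutated_pos = [] #relative to reference
-- 	backtrace = bt[::-1]
--
-- 	for k in range(len(backtrace)-1):
-- 		x0, y0 = backtrace[k]
-- 		x1, y1 = backtrace[k+1]
--
-- 		if x1 > x0 and y1 > y0: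
-- 			if string_x[x0] == string_y[y0]:
-- 				op.append('M')
-- 			else:
-- 				mutated_pos.append(x0)
-- 				op.append(string_x[x0])
-- 		elif x0 == x1:
-- 			mutated_pos.append(y0)
-- 			op.append('I')
-- 		elif y0 == y1:
-- 			mutated_pos.append(x0)
-- 			op.append('D')
--
-- 	operations = ['M', 'I', 'D']
-- 	current_op = None
-- 	count = 0
-- 	cigar = ''
-- 	for char in op:
-- 		if char in operations:
-- 			if char != current_op:
-- 				if count >= 1: cigar += f'{count}{current_op}'
-- 				current_op = char
-- 				count = 1
-- 			else:
-- 				count += 1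
-- 		else:
-- 			if current_op:
-- 				if count >= 1: cigar += f'{count}{current_op}'
-- 				count = 0
-- 				current_op = None
-- 			cigar += f'{char}'
-- 	else:
-- 		if count >= 1 and current_op: cigar += f'{count}{current_op}'
--
-- 	intolerant = False
-- 	for pos in mutated_pos:
-- 		if pos in sensitive_region:
-- 			intolerant = True
-- 			break
--
-- 	return cigar, intolerant
-- ===== SOURCE B (Python) =====
-- def _align_gRNA(string_x, string_y, bt, sensitive_region=range(15, 22)):
--     '''
--     Single fused pass over the reversed backtrace: classifies each step and
--     run-length-encodes the CIGAR on the fly, tracking intolerance inline,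
--     with no intermediate op/mutated_pos lists.
--     '''
--     cigar = ''
--     current_op = None
--     count = 0
--     intolerant = False
--     rev = bt[::-1]
--     for (x0, y0), (x1, y1) in zip(rev, rev[1:]):
--         if x1 > x0 and y1 > y0:
--             if string_x[x0] == string_y[y0]:
--                 ch, pos = 'M', None
--             else:
--                 ch, pos = string_x[x0], x0
--         elif x0 == x1:
--             ch, pos = 'I', y0
--         elif y0 == y1:
--             ch, pos = 'D', x0
--         else:
--             continue
--         if not intolerant and pos is not None and pos in sensitive_region:
--             intolerant = True
--         if ch in ('M', 'I', 'D'):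
--             if ch == current_op:
--                 count += 1
--             else:
--                 if count >= 1:
--                     cigar += f'{count}{current_op}'
--                 current_op, count = ch, 1
--         else:
--             if current_op is not None:
--                 if count >= 1:
--                     cigar += f'{count}{current_op}'
--                 current_op, count = None, 0
--             cigar += ch
--     if count >= 1 and current_op:
--         cigar += f'{count}{current_op}'
--     return cigar, intolerant
-- ===== Notes on version B (the rewrite author's own statement) =====
-- stated objective: alternative
-- what changed: A's three separate passes (build op/mutated_pos lists from the backtrace, then run-length-encode op into the CIGAR, then scan mutated_pos against the sensitive region) are fused into one loop over the reversed backtrace that maintains the running (current_op, count, cigar, intolerant) state directly, with no intermediate lists.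
import Mathlib
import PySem

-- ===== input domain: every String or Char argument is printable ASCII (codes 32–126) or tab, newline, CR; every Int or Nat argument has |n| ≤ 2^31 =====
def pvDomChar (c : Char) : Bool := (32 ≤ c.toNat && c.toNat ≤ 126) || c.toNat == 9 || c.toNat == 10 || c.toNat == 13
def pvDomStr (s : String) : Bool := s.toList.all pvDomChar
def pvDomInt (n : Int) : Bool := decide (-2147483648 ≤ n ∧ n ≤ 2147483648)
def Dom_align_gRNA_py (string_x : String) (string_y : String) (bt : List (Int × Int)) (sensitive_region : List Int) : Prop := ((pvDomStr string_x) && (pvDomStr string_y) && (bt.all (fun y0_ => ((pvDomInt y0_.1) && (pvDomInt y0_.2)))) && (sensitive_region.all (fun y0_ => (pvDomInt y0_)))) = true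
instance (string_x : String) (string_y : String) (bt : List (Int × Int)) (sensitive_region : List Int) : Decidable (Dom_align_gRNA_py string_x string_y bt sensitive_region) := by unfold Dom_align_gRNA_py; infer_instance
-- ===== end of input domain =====

-- B fuses A's three passes (backtrace classification, CIGAR run-length encoding,
-- sensitive-region scan) into one loop over the reversed backtrace; objective: alternative.


-- ===== PORT A =====
-- f'{count}{current_op}' where current_op : Option Char (None prints as "None"; unreachable in practice)
def pvFlush (count : Int) (cur : Option Char) : List Char :=
  PySem.Int.toChars count ++ (match cur with | some c => [c] | none => "None".toList)

-- first loop: builds (op, mutated_pos); `none` = IndexError from string_x[x0] / string_y[y0]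
def pvOps (sx sy : String) : List (Int × Int) → Option (List Char × List Int)
  | (x0, y0) :: (x1, y1) :: rest =>
    match pvOps sx sy ((x1, y1) :: rest) with
    | none => none
    | some (opR, mpR) =>
      if x1 > x0 ∧ y1 > y0 then
        match PySem.Str.pyGet? sx x0, PySem.Str.pyGet? sy y0 with
        | some cx, some cy =>
          if cx = cy then some ('M' :: opR, mpR) else some (cx :: opR, x0 :: mpR)
        | _, _ => none
      else if x0 = x1 then some ('I' :: opR, y0 :: mpR)
      else if y0 = y1 then some ('D' :: opR, x0 :: mpR)
      else some (opR, mpR)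
  | _ => some ([], [])

-- second loop: run-length encodes op into the cigar
def pvCigar : List Char → Option Char → Int → List Char → List Char
  | [], cur, count, cigar =>
    if count ≥ 1 ∧ cur ≠ none then cigar ++ pvFlush count cur else cigar
  | c :: rest, cur, count, cigar =>
    if c = 'M' ∨ c = 'I' ∨ c = 'D' then
      if some c ≠ cur then
        pvCigar rest (some c) 1 (if count ≥ 1 then cigar ++ pvFlush count cur else cigar)
      else pvCigar rest cur (count + 1) cigar
    else
      if cur ≠ none then
        pvCigar rest none 0 ((if count ≥ 1 then cigar ++ pvFlush count cur else cigar) ++ [c])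
      else pvCigar rest cur count (cigar ++ [c])

-- third loop: first mutated position in the sensitive region sets intolerant
def pvIntol (sens : List Int) : List Int → Bool
  | [] => false
  | p :: rest => if p ∈ sens then true else pvIntol sens rest

def align_gRNA_py (string_x : String) (string_y : String) (bt : List (Int × Int)) (sensitive_region : List Int) : String × Bool :=
  match pvOps string_x string_y bt.reverse with   -- bt[::-1] = reverse
  | none => ("", false)                           -- unreachable under Pre_ (Python raises IndexError)
  | some (op, mp) => (String.ofList (pvCigar op none 0 []), pvIntol sensitive_region mp)

-- ===== PORT B =====
-- single fused pass; `none` = IndexError (same indexing as the Python)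
def pvAltLoop (sx sy : String) (sens : List Int) : List (Int × Int) → Option Char → Int → List Char → Bool → Option (List Char × Bool)
  | (x0, y0) :: (x1, y1) :: rest, cur, count, cigar, intol =>
    match
      (if x1 > x0 ∧ y1 > y0 then
        match PySem.Str.pyGet? sx x0, PySem.Str.pyGet? sy y0 with
        | some cx, some cy =>
          if cx = cy then some (some (('M' : Char), (none : Option Int)))
          else some (some (cx, some x0))
        | _, _ => none
      else if x0 = x1 then some (some ('I', some y0))
      else if y0 = y1 then some (some ('D', some x0))
      else some none) with
    | none => none
    | some none => pvAltLoop sx sy sens ((x1, y1) :: rest) cur count cigar intol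
    | some (some (ch, pos)) =>
      let intol' := if (!intol && (match pos with | some p => decide (p ∈ sens) | none => false)) then true else intol
      if ch = 'M' ∨ ch = 'I' ∨ ch = 'D' then
        if some ch = cur then
          pvAltLoop sx sy sens ((x1, y1) :: rest) cur (count + 1) cigar intol'
        else
          pvAltLoop sx sy sens ((x1, y1) :: rest) (some ch) 1
            (if count ≥ 1 then cigar ++ pvFlush count cur else cigar) intol'
      else
        if cur ≠ none then
          pvAltLoop sx sy sens ((x1, y1) :: rest) none 0
            ((if count ≥ 1 then cigar ++ pvFlush count cur else cigar) ++ [ch]) intol'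
        else
          pvAltLoop sx sy sens ((x1, y1) :: rest) cur count (cigar ++ [ch]) intol'
  | _, cur, count, cigar, intol =>
    some ((if count ≥ 1 ∧ cur ≠ none then cigar ++ pvFlush count cur else cigar), intol)

def align_gRNA_py_alt (string_x : String) (string_y : String) (bt : List (Int × Int)) (sensitive_region : List Int) : String × Bool :=
  match pvAltLoop string_x string_y sensitive_region bt.reverse none 0 [] false with
  | none => ("", false)
  | some (cigar, intol) => (String.ofList cigar, intol)

-- ===== PRECONDITION & SPEC =====
-- Pre_ excludes exactly the inputs where Python raises IndexError: some match/mismatch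
-- step of the backtrace indexes string_x[x0] or string_y[y0] out of range.
def Pre_align_gRNA_py (string_x : String) (string_y : String) (bt : List (Int × Int)) (sensitive_region : List Int) : Prop :=
  ∀ p ∈ bt.reverse.zip bt.reverse.tail,
    (p.2.1 > p.1.1 ∧ p.2.2 > p.1.2) →
      (PySem.Str.pyGet? string_x p.1.1).isSome ∧ (PySem.Str.pyGet? string_y p.1.2).isSome
instance (string_x : String) (string_y : String) (bt : List (Int × Int)) (sensitive_region : List Int) : Decidable (Pre_align_gRNA_py string_x string_y bt sensitive_region) := by unfold Pre_align_gRNA_py; infer_instance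

def pvWitness_align_gRNA_py : String × String × (List (Int × Int)) × List Int :=
  ("ACGT", "AGGT", [(4, 4), (3, 3), (2, 2), (1, 1), (0, 0)], [1, 2])

def Spec_align_gRNA_py (string_x : String) (string_y : String) (bt : List (Int × Int)) (sensitive_region : List Int) (out : String × Bool) : Prop := out = align_gRNA_py_alt string_x string_y bt sensitive_region
instance (string_x : String) (string_y : String) (bt : List (Int × Int)) (sensitive_region : List Int) (out : String × Bool) : Decidable (Spec_align_gRNA_py string_x string_y bt sensitive_region out) := by unfold Spec_align_gRNA_py; infer_instance

-- ===== CLAIM (what is proved, stated in full; the proofs are below) =====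
def Claim_equal_align_gRNA_py : Prop := ∀ (string_x : String) (string_y : String) (bt : List (Int × Int)) (sensitive_region : List Int), Dom_align_gRNA_py string_x string_y bt sensitive_region → Pre_align_gRNA_py string_x string_y bt sensitive_region → Spec_align_gRNA_py string_x string_y bt sensitive_region (align_gRNA_py string_x string_y bt sensitive_region)

-- ===== LEMMAS AND PROOFS =====

-- one step of A's run-length-encoding state machine (proof-side helper)
def pvStep (ch : Char) (cur : Option Char) (count : Int) (cigar : List Char) :
    Option Char × Int × List Char :=
  if ch = 'M' ∨ ch = 'I' ∨ ch = 'D' then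
    if some ch ≠ cur then
      (some ch, 1, if count ≥ 1 then cigar ++ pvFlush count cur else cigar)
    else (cur, count + 1, cigar)
  else if cur ≠ none then
    (none, 0, (if count ≥ 1 then cigar ++ pvFlush count cur else cigar) ++ [ch])
  else (cur, count, cigar ++ [ch])

lemma pvCigar_cons (ch : Char) (rest : List Char) (cur : Option Char) (count : Int) (cigar : List Char) :
    pvCigar (ch :: rest) cur count cigar =
      pvCigar rest (pvStep ch cur count cigar).1 (pvStep ch cur count cigar).2.1
        (pvStep ch cur count cigar).2.2 := by
  simp only [pvCigar, pvStep]
  split_ifs <;> rfl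

-- once the flag is set, the guarded membership test is skipped and the flag stays true
lemma pv_if_not_self (b : Bool) : (if !b = true then true else b) = true := by
  cases b <;> simp

-- Main invariant: on a valid pair chain, B's fused loop returns A's cigar fold over A's op
-- list, and A's intolerance scan folded into the running flag.
lemma pvAlt_eq (sx sy : String) (sens : List Int) :
    ∀ (l : List (Int × Int)),
      (∀ p ∈ l.zip l.tail, (p.2.1 > p.1.1 ∧ p.2.2 > p.1.2) →
        (PySem.Str.pyGet? sx p.1.1).isSome ∧ (PySem.Str.pyGet? sy p.1.2).isSome) →
      ∀ (cur : Option Char) (count : Int) (cigar : List Char) (intol : Bool),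
        ∃ op mp, pvOps sx sy l = some (op, mp) ∧
          pvAltLoop sx sy sens l cur count cigar intol =
            some (pvCigar op cur count cigar, intol || pvIntol sens mp) := by
  intro l
  induction l with
  | nil =>
    intro _ cur count cigar intol
    exact ⟨[], [], rfl, by simp [pvAltLoop, pvCigar, pvIntol]⟩
  | cons p rest ih =>
    match rest with
    | [] =>
      intro _ cur count cigar intol
      exact ⟨[], [], rfl, by simp [pvAltLoop, pvCigar, pvIntol]⟩
    | q :: rest' =>
      obtain ⟨x0, y0⟩ := p
      obtain ⟨x1, y1⟩ := q
      intro h cur count cigar intol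
      have hhead := h ((x0, y0), (x1, y1)) (by simp)
      have htail : ∀ p ∈ ((x1, y1) :: rest').zip (((x1, y1) :: rest').tail),
          (p.2.1 > p.1.1 ∧ p.2.2 > p.1.2) →
            (PySem.Str.pyGet? sx p.1.1).isSome ∧ (PySem.Str.pyGet? sy p.1.2).isSome := by
        intro p hp
        exact h p (by simpa using List.mem_cons_of_mem _ hp)
      by_cases hc : x1 > x0 ∧ y1 > y0
      · obtain ⟨hx, hy⟩ := hhead hc
        simp only [] at hx hy
        obtain ⟨cx, hcx⟩ := Option.isSome_iff_exists.mp hx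
        obtain ⟨cy, hcy⟩ := Option.isSome_iff_exists.mp hy
        simp [PySem.Str.pyGet?] at hcx hcy
        by_cases hxy : cx = cy
        · -- match step: op 'M', no mutated position
          obtain ⟨opR, mpR, hA, hB⟩ :=
            ih htail (pvStep 'M' cur count cigar).1 (pvStep 'M' cur count cigar).2.1
              (pvStep 'M' cur count cigar).2.2 intol
          refine ⟨'M' :: opR, mpR, ?_, ?_⟩
          · simp [pvOps, hA, hc, hcx, hcy, hxy]
          · rw [pvCigar_cons]
            simp only [pvStep] at hB
            by_cases hcur : some 'M' = cur
            · simp [hcur] at hB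
              simp [pvAltLoop, pvStep, hc, hcx, hcy, hxy, hcur, hB]
            · simp [hcur] at hB
              simp [pvAltLoop, pvStep, hc, hcx, hcy, hxy, hcur, hB]
        · -- mismatch step: op = cx, mutated position x0
          by_cases hm : x0 ∈ sens
          all_goals
            obtain ⟨opR, mpR, hA, hB⟩ :=
              ih htail (pvStep cx cur count cigar).1 (pvStep cx cur count cigar).2.1
                (pvStep cx cur count cigar).2.2 (if decide (x0 ∈ sens) then true else intol)
          all_goals refine ⟨cx :: opR, x0 :: mpR, ?_, ?_⟩
          · simp [pvOps, hA, hc, hcx, hcy, hxy]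
          · rw [pvCigar_cons]
            simp only [pvStep] at hB
            simp [hm] at hB
            by_cases hop : cx = 'M' ∨ cx = 'I' ∨ cx = 'D'
            · by_cases hcur : some cx = cur
              · subst hcur
                simp [hop] at hB
                simp [pvAltLoop, pvStep, pvIntol, hc, hcx, hcy, hxy, hop, hm, hB, pv_if_not_self]
              · simp [hop, hcur] at hB
                simp [pvAltLoop, pvStep, pvIntol, hc, hcx, hcy, hxy, hop, hcur, hm, hB, pv_if_not_self]
            · by_cases hcur : cur = none
              · subst hcur
                simp [hop] at hB
                simp [pvAltLoop, pvStep, pvIntol, hc, hcx, hcy, hxy, hop, hm, hB, pv_if_not_self]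
              · simp [hop, hcur] at hB
                simp [pvAltLoop, pvStep, pvIntol, hc, hcx, hcy, hxy, hop, hcur, hm, hB, pv_if_not_self]
          · simp [pvOps, hA, hc, hcx, hcy, hxy]
          · rw [pvCigar_cons]
            simp only [pvStep] at hB
            simp [hm] at hB
            by_cases hop : cx = 'M' ∨ cx = 'I' ∨ cx = 'D'
            · by_cases hcur : some cx = cur
              · subst hcur
                simp [hop] at hB
                simp [pvAltLoop, pvStep, pvIntol, hc, hcx, hcy, hxy, hop, hm, hB, pv_if_not_self]
              · simp [hop, hcur] at hB
                simp [pvAltLoop, pvStep, pvIntol, hc, hcx, hcy, hxy, hop, hcur, hm, hB, pv_if_not_self]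
            · by_cases hcur : cur = none
              · subst hcur
                simp [hop] at hB
                simp [pvAltLoop, pvStep, pvIntol, hc, hcx, hcy, hxy, hop, hm, hB, pv_if_not_self]
              · simp [hop, hcur] at hB
                simp [pvAltLoop, pvStep, pvIntol, hc, hcx, hcy, hxy, hop, hcur, hm, hB, pv_if_not_self]
      · by_cases he : x0 = x1
        · -- insertion step: op 'I', mutated position y0
          by_cases hm : y0 ∈ sens
          all_goals
            obtain ⟨opR, mpR, hA, hB⟩ :=
              ih htail (pvStep 'I' cur count cigar).1 (pvStep 'I' cur count cigar).2.1
                (pvStep 'I' cur count cigar).2.2 (if decide (y0 ∈ sens) then true else intol)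
          all_goals refine ⟨'I' :: opR, y0 :: mpR, by simp [pvOps, hA, hc, he], ?_⟩
          all_goals
            rw [pvCigar_cons]
            simp only [pvStep] at hB
            simp [hm] at hB
          all_goals
            by_cases hcur : some 'I' = cur <;> simp [hcur] at hB <;>
              simp [pvAltLoop, pvStep, pvIntol, hc, he, hcur, hm, hB, pv_if_not_self]
        · by_cases hd : y0 = y1
          · -- deletion step: op 'D', mutated position x0
            by_cases hm : x0 ∈ sens
            all_goals
              obtain ⟨opR, mpR, hA, hB⟩ :=
                ih htail (pvStep 'D' cur count cigar).1 (pvStep 'D' cur count cigar).2.1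
                  (pvStep 'D' cur count cigar).2.2 (if decide (x0 ∈ sens) then true else intol)
            all_goals refine ⟨'D' :: opR, x0 :: mpR, by simp [pvOps, hA, hc, he, hd], ?_⟩
            all_goals
              rw [pvCigar_cons]
              simp only [pvStep] at hB
              simp [hm] at hB
            all_goals
              by_cases hcur : some 'D' = cur <;> simp [hcur] at hB <;>
                simp [pvAltLoop, pvStep, pvIntol, hc, he, hd, hcur, hm, hB, pv_if_not_self]
          · -- no branch fires: skip
            obtain ⟨opR, mpR, hA, hB⟩ := ih htail cur count cigar intol
            refine ⟨opR, mpR, ?_, ?_⟩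
            · simp [pvOps, hA, hc, he, hd]
            · simp [pvAltLoop, hc, he, hd, hB]

-- ===== VERDICT (by name: the statement is the Claim_ definition above) =====
theorem align_gRNA_py_spec : Claim_equal_align_gRNA_py := by
  intro sx sy bt sens _hdom hpre
  unfold Spec_align_gRNA_py
  obtain ⟨op, mp, hA, hB⟩ := pvAlt_eq sx sy sens bt.reverse hpre none 0 [] false
  simp [align_gRNA_py, align_gRNA_py_alt, hA, hB]
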